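-- pv_equiv track=rewrite | github.com/marcotran/pyurgent | Qglobal.py | getTrimString
-- ===== SOURCE A (Python) =====
-- def getTrimString(txt):
--     '''remove space, get 3 first letters from each word'''
--     m = txt.split()
--     r = ''
--     for mm in m:
--         if mm.isalnum():
--             r = r+mm[:3]
--         else:
--             for i in range(0,3):
--                 try:
--                     if mm[i].isalnum():
--                         r = r + mm[i]
--                 except:
--                     continue
--     return r
-- ===== SOURCE B (Python) =====
-- def getTrimString(txt):
--     '''remove space, get 3 first letters from each word'''
--     out = []
--     pos = 0  # index within the current word
--     for c in txt:
--         if c.isspace():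
--             pos = 0
--         else:
--             if pos < 3 and c.isalnum():
--                 out.append(c)
--             pos += 1
--     return ''.join(out)
-- ===== Notes on version B (the rewrite author's own statement) =====
-- stated objective: alternative
-- what changed: Replaces split-into-words plus per-word branching (whole-word isalnum fast path vs indexed try/except loop) with a single character-level state machine over the raw string: a position counter resets on whitespace and each non-space char is emitted iff its in-word position is < 3 and it is alnum; no splitting and no slicing.
import Mathlib
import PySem

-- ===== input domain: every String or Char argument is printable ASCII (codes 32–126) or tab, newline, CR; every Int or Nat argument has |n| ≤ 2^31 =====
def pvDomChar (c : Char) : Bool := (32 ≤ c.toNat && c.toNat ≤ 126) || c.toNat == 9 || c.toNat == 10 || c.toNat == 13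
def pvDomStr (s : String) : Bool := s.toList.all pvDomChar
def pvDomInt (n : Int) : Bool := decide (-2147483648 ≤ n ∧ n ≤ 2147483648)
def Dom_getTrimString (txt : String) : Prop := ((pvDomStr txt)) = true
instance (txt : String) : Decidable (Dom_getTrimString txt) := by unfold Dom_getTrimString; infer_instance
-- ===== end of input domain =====

-- B replaces A's split-into-words + two-branch per-word loop with a single character-level
-- state machine (an in-word position counter resetting on whitespace); alternative, same cost.

-- ===== PORT A =====
-- Python strings are ported as their char lists; String.ofList converts back at the boundary.
def getTrimString (txt : String) : String :=
  let m := PySem.Chars.split₀ txt.toList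
  let r : List Char := m.foldl (fun r mm =>
    if PySem.Chars.strIsalnum mm then
      r ++ PySem.List.slice mm none (some 3)
    else
      (PySem.List.pyRange 0 3 1).foldl (fun r i =>
        match PySem.List.pyGet? mm i with
        | some c => if PySem.Chars.isalnum c then r ++ [c] else r
        | none => r) r) []   -- IndexError is caught → continue
  String.ofList r

-- ===== PORT B =====
-- One pass over the characters: st = (out, pos-in-current-word); whitespace resets pos.
def getTrimString_alt (txt : String) : String :=
  String.ofList (txt.toList.foldl (fun (st : List Char × Nat) c =>
    if PySem.Chars.isspace c then (st.1, 0)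
    else ((if st.2 < 3 && PySem.Chars.isalnum c then st.1 ++ [c] else st.1), st.2 + 1))
    ([], 0)).1

-- ===== PRECONDITION & SPEC =====
def Spec_getTrimString (txt : String) (out : String) : Prop := out = getTrimString_alt txt
instance (txt : String) (out : String) : Decidable (Spec_getTrimString txt out) := by unfold Spec_getTrimString; infer_instance

-- ===== CLAIM (what is proved, stated in full; the proofs are below) =====
def Claim_equal_getTrimString : Prop := ∀ (txt : String), Dom_getTrimString txt → Spec_getTrimString txt (getTrimString txt)

-- ===== LEMMAS AND PROOFS =====

-- Common specification: the output chars of the suffix s when n chars of the current word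
-- have already been read.
def pvC (n : Nat) : List Char → List Char
  | [] => []
  | c :: s =>
    if PySem.Chars.isspace c then pvC 0 s
    else (if n < 3 && PySem.Chars.isalnum c then [c] else []) ++ pvC (n + 1) s

-- B's fold computes pvC.
lemma b_fold_eq_pvC (s : List Char) (r : List Char) (n : Nat) :
    (s.foldl (fun (st : List Char × Nat) c =>
      if PySem.Chars.isspace c then (st.1, 0)
      else ((if st.2 < 3 && PySem.Chars.isalnum c then st.1 ++ [c] else st.1), st.2 + 1))
      (r, n)).1 = r ++ pvC n s := by
  induction s generalizing r n with
  | nil => simp [pvC]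
  | cons c s ih =>
    by_cases h : PySem.Chars.isspace c
    · simp only [List.foldl_cons, if_pos h, ih]
      simp [pvC, h]
    · simp only [List.foldl_cons, if_neg h, ih]
      by_cases h2 : (decide (n < 3) && PySem.Chars.isalnum c) = true
      · simp [pvC, h, h2]
      · simp [pvC, h, h2]

-- A's per-word contribution (as proved against its foldl below) is filter-of-take-3.
def pvF (w : List Char) : List Char := (w.take 3).filter PySem.Chars.isalnum

-- split₀'s worker, flat-mapped with pvF, computes pvC (cur is the reversed current word).
lemma go_flatMap_eq_pvC (s : List Char) (cur : List Char) (acc : List (List Char)) :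
    (PySem.Chars.split₀.go s cur acc).flatMap pvF
      = acc.reverse.flatMap pvF ++ (cur.reverse.take 3).filter PySem.Chars.isalnum
        ++ pvC cur.length s := by
  induction s generalizing cur acc with
  | nil =>
    simp only [PySem.Chars.split₀.go, pvC]
    by_cases h : cur.isEmpty
    · simp_all
    · have : cur ≠ [] := by simpa [List.isEmpty_iff] using h
      simp [h, pvF]
  | cons c s ih =>
    simp only [PySem.Chars.split₀.go, pvC]
    by_cases h : PySem.Chars.isspace c
    · by_cases hc : cur.isEmpty
      · have : cur = [] := by simpa [List.isEmpty_iff] using hc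
        simp [h, ih, this]
      · have hne : ¬ cur = [] := by simpa [List.isEmpty_iff] using hc
        simp [h, hne, ih [] (cur.reverse :: acc), pvF, List.append_assoc]
    · have := ih (c :: cur) acc
      simp only [h, Bool.false_eq_true, if_false] at this ⊢
      rw [this]
      have htake : ((cur.reverse ++ [c]).take 3)
          = cur.reverse.take 3 ++ [c].take (3 - cur.length) := by
        rw [List.take_append, List.length_reverse]
      by_cases hn : cur.length < 3
      · have h1 : [c].take (3 - cur.length) = [c] :=
          List.take_of_length_le (by simp; omega)
        by_cases ha : PySem.Chars.isalnum c
        · simp [htake, h1, hn, ha, List.filter_append]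
        · simp [htake, h1, hn, ha, List.filter_append]
      · have h0 : 3 - cur.length = 0 := by omega
        simp [htake, h0, hn]

-- A's per-word foldl step equals appending pvF of the word.
lemma a_word_step (r w : List Char) :
    (if PySem.Chars.strIsalnum w then
      r ++ PySem.List.slice w none (some 3)
    else
      (PySem.List.pyRange 0 3 1).foldl (fun r i =>
        match PySem.List.pyGet? w i with
        | some c => if PySem.Chars.isalnum c then r ++ [c] else r
        | none => r) r)
    = r ++ pvF w := by
  have hsl : PySem.List.slice w none (some 3) = w.take 3 := by
    simpa using PySem.List.slice_to_natCast w 3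
  unfold pvF
  rw [hsl]
  by_cases h : PySem.Chars.strIsalnum w
  · rw [if_pos h, List.filter_eq_self.mpr]
    have h' : ¬w = [] ∧ ∀ x ∈ w, PySem.Chars.isalnum x = true := by
      simpa [PySem.Chars.strIsalnum] using h
    exact fun c hc => h'.2 c (List.mem_of_mem_take hc)
  · rw [if_neg h]
    have hrange : PySem.List.pyRange 0 3 1 = [0, 1, 2] := by decide
    rw [hrange]
    have g0 := PySem.List.pyGet?_natCast w 0
    have g1 := PySem.List.pyGet?_natCast w 1
    have g2 := PySem.List.pyGet?_natCast w 2
    norm_num at g0 g1 g2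
    simp only [List.foldl, g0, g1, g2]
    rcases w with _ | ⟨a, _ | ⟨b, _ | ⟨c, t⟩⟩⟩
    · simp
    · cases ha : PySem.Chars.isalnum a <;> simp [ha]
    · cases ha : PySem.Chars.isalnum a <;> cases hb : PySem.Chars.isalnum b <;>
        simp [ha, hb]
    · cases ha : PySem.Chars.isalnum a <;> cases hb : PySem.Chars.isalnum b <;>
        cases hc : PySem.Chars.isalnum c <;> simp [ha, hb, hc]

-- ===== VERDICT (by name: the statement is the Claim_ definition above) =====
theorem getTrimString_spec : Claim_equal_getTrimString := by
  intro txt _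
  unfold Spec_getTrimString getTrimString getTrimString_alt
  have hA : (fun (r mm : List Char) =>
      if PySem.Chars.strIsalnum mm then
        r ++ PySem.List.slice mm none (some 3)
      else
        (PySem.List.pyRange 0 3 1).foldl (fun r i =>
          match PySem.List.pyGet? mm i with
          | some c => if PySem.Chars.isalnum c then r ++ [c] else r
          | none => r) r)
      = fun r mm => r ++ pvF mm := by
    funext r mm; exact a_word_step r mm
  rw [hA]
  simp only [PySem.List.foldl_append_eq_flatMap, List.nil_append, b_fold_eq_pvC]
  have h2 := go_flatMap_eq_pvC txt.toList [] []
  simp only [PySem.Chars.split₀]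
  rw [h2]
  simp
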